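-- pv_equiv track=rewrite | github.com/bushuyeu/koa | src/koa_cli/commands/limits.py | _parse_current_usage
-- ===== SOURCE A (Python) =====
-- def _parse_current_usage(raw: str) -> dict:
--     """Parse squeue output to compute running/pending counts and GPU usage."""
--     running = 0
--     pending = 0
--     gpus_in_use = 0
--     for line in raw.strip().splitlines():
--         line = line.strip()
--         if not line:
--             continue
--         parts = [p.strip() for p in line.split("|")]
--         if len(parts) < 3:
--             continue
--         state = parts[1]
--         gres = parts[2]
--         if state == "RUNNING":
--             running += 1
--             gpus_in_use += _count_gpus_from_gres(gres)
--         elif state == "PENDING":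
--             pending += 1
--     return {
--         "running": running,
--         "pending": pending,
--         "total": running + pending,
--         "gpus_in_use": gpus_in_use,
--     }
--
-- def _count_gpus_from_gres(gres: str) -> int:
--     """Extract GPU count from a GRES string like 'gpu:a100:2'."""
--     if not gres:
--         return 0
--     total = 0
--     for entry in gres.split(","):
--         entry = entry.strip()
--         if not entry.startswith("gpu"):
--             continue
--         segments = entry.split(":")
--         try:
--             total += int(segments[-1])
--         except (ValueError, IndexError):
--             total += 1
--     return total
-- ===== SOURCE B (Python) =====
-- def _record(line):
--     line = line.strip()
--     if not line:
--         return None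
--     parts = [p.strip() for p in line.split("|")]
--     if len(parts) < 3:
--         return None
--     return (parts[1], parts[2])
--
--
-- def _parse_current_usage(raw: str) -> dict:
--     """Parse squeue output: materialize (state, gres) records, then aggregate."""
--     records = [r for r in map(_record, raw.strip().splitlines()) if r is not None]
--     running = sum(1 for s, _ in records if s == "RUNNING")
--     pending = sum(1 for s, _ in records if s == "PENDING")
--     gpus_in_use = sum(_count_gpus_from_gres(g) for s, g in records if s == "RUNNING")
--     return {
--         "running": running,
--         "pending": pending,
--         "total": running + pending,
--         "gpus_in_use": gpus_in_use,
--     }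
--
--
-- def _count_gpus_from_gres(gres: str) -> int:
--     if not gres:
--         return 0
--     total = 0
--     for entry in gres.split(","):
--         entry = entry.strip()
--         if not entry.startswith("gpu"):
--             continue
--         segments = entry.split(":")
--         try:
--             total += int(segments[-1])
--         except (ValueError, IndexError):
--             total += 1
--     return total
-- ===== Notes on version B (the rewrite author's own statement) =====
-- stated objective: alternative
-- what changed: A aggregates in one fused loop with three mutable counters; B first materializes a list of parsed (state, gres) records and then computes each statistic with a separate aggregation pass (two counts and one sum over RUNNING records).
import Mathlib
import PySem

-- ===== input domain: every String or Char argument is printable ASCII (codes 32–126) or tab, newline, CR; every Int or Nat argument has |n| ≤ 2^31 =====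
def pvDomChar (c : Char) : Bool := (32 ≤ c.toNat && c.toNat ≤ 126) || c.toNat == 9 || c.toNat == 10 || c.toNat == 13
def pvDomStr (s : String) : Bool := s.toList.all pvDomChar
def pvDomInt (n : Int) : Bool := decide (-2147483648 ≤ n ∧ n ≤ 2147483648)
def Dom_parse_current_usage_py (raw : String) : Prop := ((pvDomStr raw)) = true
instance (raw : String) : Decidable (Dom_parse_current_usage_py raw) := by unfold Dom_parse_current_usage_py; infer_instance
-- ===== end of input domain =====

-- B replaces A's single fused counting loop by a record-materializing pass followed by
-- separate aggregation passes (alternative decomposition, same cost; return value only).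

-- ===== PORT A =====
-- shared helper: the Python helper _count_gpus_from_gres, identical in Source A and Source B
def countGpusFromGres (gres : String) : Int :=
  if gres == "" then 0
  else
    ((PySem.Str.split? gres ",").getD []).foldl (fun total entry =>
      let entry := PySem.Str.strip entry
      if PySem.Str.startswith entry "gpu" = false then total
      else
        let segments := (PySem.Str.split? entry ":").getD []
        match PySem.List.pyGet? segments (-1) with
        | none => total + 1                      -- IndexError branch of the try/except
        | some s =>
          match PySem.Int.ofStr? s with          -- int(...) ; ValueError → except
          | some n => total + n
          | none => total + 1) 0

-- A's loop body (the body of A's for-loop, named; A keeps three scalar accumulators)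
def aStep (acc : Int × Int × Int) (line : String) : Int × Int × Int :=
  let line := PySem.Str.strip line
  if line == "" then acc
  else
    let parts := ((PySem.Str.split? line "|").getD []).map (fun p => PySem.Str.strip p)
    if parts.length < 3 then acc
    else
      let state := PySem.List.pyGetD parts 1 ""   -- in range: parts.length ≥ 3
      let gres := PySem.List.pyGetD parts 2 ""
      if state == "RUNNING" then (acc.1 + 1, acc.2.1, acc.2.2 + countGpusFromGres gres)
      else if state == "PENDING" then (acc.1, acc.2.1 + 1, acc.2.2)
      else acc

def parse_current_usage_py (raw : String) : List (String × Int) :=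
  let st := (PySem.Str.splitlines (PySem.Str.strip raw)).foldl aStep ((0 : Int), (0 : Int), (0 : Int))
  [("running", st.1), ("pending", st.2.1), ("total", st.1 + st.2.1), ("gpus_in_use", st.2.2)]

-- ===== PORT B =====
-- Source B helper _record: a non-empty line with ≥ 3 '|'-fields becomes a (state, gres) record
def recordOfLine (line : String) : Option (String × String) :=
  let line := PySem.Str.strip line
  if line == "" then none
  else
    let parts := ((PySem.Str.split? line "|").getD []).map (fun p => PySem.Str.strip p)
    if parts.length < 3 then none
    else some (PySem.List.pyGetD parts 1 "", PySem.List.pyGetD parts 2 "")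

def parse_current_usage_py_alt (raw : String) : List (String × Int) :=
  let records := (PySem.Str.splitlines (PySem.Str.strip raw)).filterMap recordOfLine
  let running : Int := (records.countP (fun r => r.1 == "RUNNING") : Nat)
  let pending : Int := (records.countP (fun r => r.1 == "PENDING") : Nat)
  let gpus_in_use : Int :=
    ((records.filter (fun r => r.1 == "RUNNING")).map (fun r => countGpusFromGres r.2)).sum
  [("running", running), ("pending", pending), ("total", running + pending),
   ("gpus_in_use", gpus_in_use)]

-- ===== PRECONDITION & SPEC =====
def Spec_parse_current_usage_py (raw : String) (out : List (String × Int)) : Prop := out = parse_current_usage_py_alt raw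
instance (raw : String) (out : List (String × Int)) : Decidable (Spec_parse_current_usage_py raw out) := by unfold Spec_parse_current_usage_py; infer_instance

-- ===== CLAIM (what is proved, stated in full; the proofs are below) =====
def Claim_equal_parse_current_usage_py : Prop := ∀ (raw : String), Dom_parse_current_usage_py raw → Spec_parse_current_usage_py raw (parse_current_usage_py raw)

-- ===== LEMMAS AND PROOFS =====

lemma aStep_none (acc : Int × Int × Int) (line : String)
    (h : recordOfLine line = none) : aStep acc line = acc := by
  by_cases h1 : (PySem.Str.strip line == "") = true
  · simp [aStep, h1]
  · by_cases h2 : ((PySem.Str.split? (PySem.Str.strip line) "|").getD []).length < 3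
    · simp [aStep, h1, h2]
    · simp [recordOfLine, h1, h2] at h

lemma aStep_some (acc : Int × Int × Int) (line : String) (s g : String)
    (h : recordOfLine line = some (s, g)) :
    aStep acc line =
      (if s == "RUNNING" then (acc.1 + 1, acc.2.1, acc.2.2 + countGpusFromGres g)
       else if s == "PENDING" then (acc.1, acc.2.1 + 1, acc.2.2)
       else acc) := by
  by_cases h1 : (PySem.Str.strip line == "") = true
  · simp [recordOfLine, h1] at h
  · by_cases h2 : ((PySem.Str.split? (PySem.Str.strip line) "|").getD []).length < 3
    · simp [recordOfLine, h1, h2] at h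
    · simp [recordOfLine, h1, h2] at h
      obtain ⟨hs, hg⟩ := h
      subst hs; subst hg
      simp [aStep, h1, h2]

lemma loop_eq (lines : List String) (r p g : Int) :
    lines.foldl aStep (r, p, g) =
      (r + ((lines.filterMap recordOfLine).countP (fun x => x.1 == "RUNNING") : Nat),
       p + ((lines.filterMap recordOfLine).countP (fun x => x.1 == "PENDING") : Nat),
       g + (((lines.filterMap recordOfLine).filter (fun x => x.1 == "RUNNING")).map
              (fun x => countGpusFromGres x.2)).sum) := by
  induction lines generalizing r p g with
  | nil => simp
  | cons line rest ih =>
    rw [List.foldl_cons, List.filterMap_cons]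
    cases h : recordOfLine line with
    | none => rw [aStep_none _ _ h]; exact ih r p g
    | some rec =>
      obtain ⟨s, gr⟩ := rec
      rw [aStep_some _ _ _ _ h]
      by_cases hr : s = "RUNNING"
      · subst hr
        simp only [ih, List.countP_cons, List.filter_cons]
        simp only [beq_self_eq_true, if_true]
        norm_num
        refine ⟨by ring, by ring⟩
      · by_cases hp : s = "PENDING"
        · subst hp
          simp only [ih, List.countP_cons, List.filter_cons]
          simp
          ring
        · simp only [ih, List.countP_cons, List.filter_cons]
          simp [hr, hp]

-- ===== VERDICT (by name: the statement is the Claim_ definition above) =====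
theorem parse_current_usage_py_spec : Claim_equal_parse_current_usage_py := by
  intro raw _
  show parse_current_usage_py raw = parse_current_usage_py_alt raw
  rw [parse_current_usage_py, parse_current_usage_py_alt, loop_eq]
  simp only [zero_add]
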